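-- pv_equiv track=rewrite | github.com/Nithyasri-06/AI-DE-Tasks | password_validator/password_validator.py | check_character
-- ===== SOURCE A (Python) =====
-- def check_character(password):
--   is_upper=False
--   is_lower=False
--   is_digit=False
--   is_special=False
--   for ch in password:
--     if ch.isspace():
--         return None,None,None,None,"invalid"
--     elif ch.isupper():
--         is_upper=True
--     elif ch.islower():
--         is_lower=True
--     elif ch.isdigit():
--         is_digit=True
--     else:
--         is_special=True
--   return is_upper,is_lower,is_digit,is_special,"valid"
-- ===== SOURCE B (Python) =====
-- def check_character(password):
--     if any(c.isspace() for c in password):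
--         return None, None, None, None, "invalid"
--     is_upper = any(c.isupper() for c in password)
--     is_lower = any(c.islower() for c in password)
--     is_digit = any(c.isdigit() for c in password)
--     is_special = any(not (c.isupper() or c.islower() or c.isdigit()) for c in password)
--     return is_upper, is_lower, is_digit, is_special, "valid"
-- ===== Notes on version B (the rewrite author's own statement) =====
-- stated objective: simpler
-- what changed: Replaced the single accumulating if/elif loop with a whitespace guard followed by four independent any() existence scans, one per character class.
import Mathlib
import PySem

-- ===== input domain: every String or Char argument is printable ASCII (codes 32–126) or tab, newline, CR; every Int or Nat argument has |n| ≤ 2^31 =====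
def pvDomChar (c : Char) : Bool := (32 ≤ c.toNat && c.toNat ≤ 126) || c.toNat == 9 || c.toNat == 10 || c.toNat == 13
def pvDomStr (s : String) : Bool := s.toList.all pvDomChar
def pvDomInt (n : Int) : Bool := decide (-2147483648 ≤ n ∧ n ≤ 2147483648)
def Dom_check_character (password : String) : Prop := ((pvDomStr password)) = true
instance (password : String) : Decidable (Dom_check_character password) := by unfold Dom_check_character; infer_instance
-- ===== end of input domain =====

-- B replaces A's single accumulating if/elif loop by a whitespace guard plus four independent any() scans (objective: simpler).

-- ===== PORT A =====
-- A's for-loop with early return on whitespace, accumulating the four flags.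
def checkCharLoop : List Char → Bool → Bool → Bool → Bool → Option Bool × Option Bool × Option Bool × Option Bool × String
  | [], u, l, d, s => (some u, some l, some d, some s, "valid")
  | ch :: rest, u, l, d, s =>
    if PySem.Chars.isspace ch then (none, none, none, none, "invalid")
    else if PySem.Chars.isupper ch then checkCharLoop rest true l d s
    else if PySem.Chars.islower ch then checkCharLoop rest u true d s
    else if PySem.Chars.isdigit ch then checkCharLoop rest u l true s
    else checkCharLoop rest u l d true

def check_character (password : String) : Option Bool × Option Bool × Option Bool × Option Bool × String :=
  checkCharLoop password.toList false false false false

-- ===== PORT B =====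
def check_character_alt (password : String) : Option Bool × Option Bool × Option Bool × Option Bool × String :=
  if password.toList.any (fun c => PySem.Chars.isspace c) then
    (none, none, none, none, "invalid")
  else
    (some (password.toList.any (fun c => PySem.Chars.isupper c)),
     some (password.toList.any (fun c => PySem.Chars.islower c)),
     some (password.toList.any (fun c => PySem.Chars.isdigit c)),
     some (password.toList.any (fun c => !(PySem.Chars.isupper c || PySem.Chars.islower c || PySem.Chars.isdigit c))),
     "valid")

-- ===== PRECONDITION & SPEC =====
def Spec_check_character (password : String) (out : Option Bool × Option Bool × Option Bool × Option Bool × String) : Prop := out = check_character_alt password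
instance (password : String) (out : Option Bool × Option Bool × Option Bool × Option Bool × String) : Decidable (Spec_check_character password out) := by unfold Spec_check_character; infer_instance

-- ===== CLAIM (what is proved, stated in full; the proofs are below) =====
def Claim_equal_check_character : Prop := ∀ (password : String), Dom_check_character password → Spec_check_character password (check_character password)

-- ===== LEMMAS AND PROOFS =====

-- ASCII class exclusivity: the three ranges A–Z, a–z, 0–9 are disjoint.
theorem upper_not_lower (c : Char) (h : PySem.Chars.isupper c = true) : PySem.Chars.islower c = false := by
  simp only [PySem.Chars.isupper, Bool.and_eq_true, decide_eq_true_eq] at h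
  unfold PySem.Chars.islower
  simp only [Bool.and_eq_false_iff, decide_eq_false_iff_not, not_le]
  exact Or.inl (lt_of_le_of_lt h.2 (by decide))

theorem upper_not_digit (c : Char) (h : PySem.Chars.isupper c = true) : PySem.Chars.isdigit c = false := by
  simp only [PySem.Chars.isupper, Bool.and_eq_true, decide_eq_true_eq] at h
  unfold PySem.Chars.isdigit
  simp only [Bool.and_eq_false_iff, decide_eq_false_iff_not, not_le]
  exact Or.inr (lt_of_lt_of_le (by decide) h.1)

theorem lower_not_digit (c : Char) (h : PySem.Chars.islower c = true) : PySem.Chars.isdigit c = false := by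
  simp only [PySem.Chars.islower, Bool.and_eq_true, decide_eq_true_eq] at h
  unfold PySem.Chars.isdigit
  simp only [Bool.and_eq_false_iff, decide_eq_false_iff_not, not_le]
  exact Or.inr (lt_of_lt_of_le (by decide) h.1)

theorem checkCharLoop_char (cs : List Char) (u l d s : Bool) :
    checkCharLoop cs u l d s =
      if cs.any (fun c => PySem.Chars.isspace c) then (none, none, none, none, "invalid")
      else (some (u || cs.any (fun c => PySem.Chars.isupper c)),
            some (l || cs.any (fun c => PySem.Chars.islower c)),
            some (d || cs.any (fun c => PySem.Chars.isdigit c)),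
            some (s || cs.any (fun c => !(PySem.Chars.isupper c || PySem.Chars.islower c || PySem.Chars.isdigit c))),
            "valid") := by
  induction cs generalizing u l d s with
  | nil => simp [checkCharLoop]
  | cons c rest ih =>
    by_cases hs : PySem.Chars.isspace c
    · simp [checkCharLoop, hs]
    · by_cases hu : PySem.Chars.isupper c
      · simp [checkCharLoop, hs, hu, ih, Bool.or_assoc,
              upper_not_lower c hu, upper_not_digit c hu]
      · by_cases hl : PySem.Chars.islower c
        · simp [checkCharLoop, hs, hu, hl, ih, Bool.or_assoc, lower_not_digit c hl]
        · by_cases hd : PySem.Chars.isdigit c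
          · simp [checkCharLoop, hs, hu, hl, hd, ih, Bool.or_assoc]
          · simp [checkCharLoop, hs, hu, hl, hd, ih, Bool.or_assoc]

-- ===== VERDICT (by name: the statement is the Claim_ definition above) =====
theorem check_character_spec : Claim_equal_check_character := by
  intro password _
  unfold Spec_check_character check_character check_character_alt
  rw [checkCharLoop_char]
  simp
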